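-- pv_equiv track=rewrite | github.com/MircoFurini/Reinforcement-Learning-environments-human-in-the-loop | Gymnasium_GUI/code/frozen_lake_page.py | verify_letters
-- ===== SOURCE A (Python) =====
-- def verify_letters(stringa): #method for button _start_clicked
--     count_row_letters = 0
--     start_number = 0
--     goal_number = 0
--
--     for letter in stringa:
--         count_row_letters+=1
--         if letter not in ['S','F','H','G']:
--             return False, 0, 0
--         if letter == 'S': start_number+=1
--         if letter == 'G': goal_number+=1
--
--     if count_row_letters != 4:
--         return False, 0, 0
--     return True, start_number, goal_number
-- ===== SOURCE B (Python) =====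
-- def verify_letters(stringa):
--     # Build a character histogram, then decide everything from it.
--     freq = {}
--     for c in stringa:
--         freq[c] = freq.get(c, 0) + 1
--     if sum(freq.values()) != 4 or any(k not in ('S', 'F', 'H', 'G') for k in freq):
--         return False, 0, 0
--     return True, freq.get('S', 0), freq.get('G', 0)
-- ===== Notes on version B (the rewrite author's own statement) =====
-- stated objective: alternative
-- what changed: Replaced A's early-return loop with three scalar accumulators by building a character-frequency dictionary and deriving length (sum of counts), validity (key-set subset) and both counts from the histogram.
import Mathlib
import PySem

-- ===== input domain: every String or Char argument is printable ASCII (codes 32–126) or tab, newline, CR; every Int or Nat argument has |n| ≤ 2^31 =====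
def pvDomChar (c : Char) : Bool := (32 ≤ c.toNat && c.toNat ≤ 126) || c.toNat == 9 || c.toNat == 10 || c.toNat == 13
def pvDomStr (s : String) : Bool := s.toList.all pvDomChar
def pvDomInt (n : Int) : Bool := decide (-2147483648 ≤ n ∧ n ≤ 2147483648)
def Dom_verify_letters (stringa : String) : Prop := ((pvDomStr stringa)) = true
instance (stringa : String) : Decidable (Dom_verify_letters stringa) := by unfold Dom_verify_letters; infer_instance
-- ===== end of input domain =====

-- B builds a character-frequency dictionary and derives length, validity and both
-- counts from the histogram, instead of A's early-return loop with three scalar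
-- accumulators; objective: alternative (same O(n) cost).


-- ===== PORT A =====
-- the for-loop with its three accumulators and early return, as structural recursion
def verifyLettersLoop (l : List Char) (cnt s g : Int) : Bool × Int × Int :=
  match l with
  | [] => if cnt ≠ 4 then (false, 0, 0) else (true, s, g)
  | c :: rest =>
      if c ∉ ['S', 'F', 'H', 'G'] then (false, 0, 0)
      else verifyLettersLoop rest (cnt + 1)
            (if c = 'S' then s + 1 else s) (if c = 'G' then g + 1 else g)

def verify_letters (stringa : String) : Bool × Int × Int :=
  verifyLettersLoop stringa.toList 0 0 0

-- ===== PORT B =====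
-- freq[c] = freq.get(c, 0) + 1 over the string, then all answers read off the dict
def verify_letters_alt (stringa : String) : Bool × Int × Int :=
  let freq : PySem.Dict Char Int :=
    stringa.toList.foldl (fun d c => d.insert c (d.getD c 0 + 1)) PySem.Dict.empty
  if freq.values.sum ≠ 4 ∨ freq.keys.any (fun k => k ∉ ['S', 'F', 'H', 'G']) then
    (false, 0, 0)
  else
    (true, freq.getD 'S' 0, freq.getD 'G' 0)

-- ===== PRECONDITION & SPEC =====
def Spec_verify_letters (stringa : String) (out : Bool × Int × Int) : Prop := out = verify_letters_alt stringa
instance (stringa : String) (out : Bool × Int × Int) : Decidable (Spec_verify_letters stringa out) := by unfold Spec_verify_letters; infer_instance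

-- ===== CLAIM (what is proved, stated in full; the proofs are below) =====
def Claim_equal_verify_letters : Prop := ∀ (stringa : String), Dom_verify_letters stringa → Spec_verify_letters stringa (verify_letters stringa)

-- ===== LEMMAS AND PROOFS =====

-- characterisation of A's loop
theorem verifyLettersLoop_eq (l : List Char) (cnt s g : Int) :
    verifyLettersLoop l cnt s g =
      if l.all (fun c => c ∈ ['S', 'F', 'H', 'G']) then
        (if cnt + l.length = 4 then (true, s + l.count 'S', g + l.count 'G') else (false, 0, 0))
      else (false, 0, 0) := by
  induction l generalizing cnt s g with
  | nil =>
      by_cases h : cnt = 4 <;> simp [verifyLettersLoop, h]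
  | cons c rest ih =>
      by_cases hc : c ∈ ['S', 'F', 'H', 'G']
      · have step : verifyLettersLoop (c :: rest) cnt s g =
            verifyLettersLoop rest (cnt + 1) (if c = 'S' then s + 1 else s)
              (if c = 'G' then g + 1 else g) := by
          simp [verifyLettersLoop, hc]
        rw [step, ih]
        simp only [List.all_cons, hc, decide_true, Bool.true_and, List.length_cons]
        split_ifs <;>
          first
          | rfl
          | (exfalso; omega)
          | (simp_all [Prod.mk.injEq]; omega)
          | simp_all
      · simp only [verifyLettersLoop]
        rw [if_pos hc, List.all_cons, if_neg (by simp [hc])]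

-- the histogram's values sum to the length of the list
theorem counter_values_sum (l : List Char) :
    (PySem.Dict.counter l).values.sum = (l.length : Int) := by
  rw [PySem.Dict.values_eq_map_keys _ (PySem.Dict.nodup_keys_counter l) 0]
  have hkeys : (PySem.Dict.counter l).keys = PySem.Set.ofList l :=
    PySem.Dict.keys_counter l
  rw [hkeys]
  have hget : ∀ k, (PySem.Dict.counter l).getD k 0 = (l.count k : Int) := fun k =>
    PySem.Dict.getD_counter l k
  rw [List.map_congr_left (fun k _ => hget k)]
  -- sum of counts over a nodup list with the same members as the list = length
  have hperm : List.Perm (PySem.Set.ofList l) l.dedup := by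
    refine (List.perm_ext_iff_of_nodup (PySem.Set.nodup_ofList l) l.nodup_dedup).mpr ?_
    intro a
    rw [PySem.Set.mem_ofList, List.mem_dedup]
  calc ((PySem.Set.ofList l).map (fun k => (l.count k : Int))).sum
      = (l.dedup.map (fun k => (l.count k : Int))).sum :=
        (hperm.map (fun k => (l.count k : Int))).sum_eq
    _ = ((l.dedup.map (fun k => l.count k)).sum : Int) := by
        induction l.dedup with
        | nil => simp
        | cons x t ih => simp [ih]
    _ = (l.length : Int) := by rw [List.sum_map_count_dedup_eq_length]

-- ===== VERDICT (by name: the statement is the Claim_ definition above) =====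
theorem verify_letters_spec : Claim_equal_verify_letters := by
  intro stringa _
  unfold Spec_verify_letters verify_letters verify_letters_alt
  rw [verifyLettersLoop_eq]
  have hfreq : stringa.toList.foldl (fun d c => d.insert c (d.getD c 0 + 1)) PySem.Dict.empty
      = PySem.Dict.counter stringa.toList :=
    PySem.Dict.foldl_insert_getD_add_one_eq_counter stringa.toList
  simp only [hfreq]
  have hany : ((PySem.Dict.counter stringa.toList).keys.any
        (fun k => decide (k ∉ ['S', 'F', 'H', 'G'])))
      = ! (stringa.toList.all (fun c => decide (c ∈ ['S', 'F', 'H', 'G']))) := by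
    rw [PySem.Dict.keys_counter]
    simp only [List.any_eq, List.all_eq_not_any_not, PySem.Set.mem_ofList]
    simp
  by_cases hall : stringa.toList.all (fun c => c ∈ ['S', 'F', 'H', 'G'])
  · rw [if_pos hall]
    by_cases h4 : (stringa.toList.length : Int) = 4
    · rw [if_pos (by omega), if_neg ?_]
      · simp [PySem.Dict.getD_counter]
      · rintro (h | h)
        · exact h (by rw [counter_values_sum]; exact h4)
        · rw [hany, hall] at h; simp at h
    · rw [if_neg (by omega), if_pos (Or.inl (by rw [counter_values_sum]; exact h4))]
  · rw [if_neg hall, if_pos (Or.inr ?_)]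
    rw [hany]
    simp only [List.all_eq_true] at hall
    push Not at hall
    obtain ⟨x, hx, hxm⟩ := hall
    simp only [Bool.not_eq_eq_eq_not, Bool.not_true, List.all_eq_false]
    exact ⟨x, hx, by simpa using hxm⟩
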